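-- pv_equiv track=rewrite | github.com/Jsummer121/MyPythonCode | 蓝桥杯-测试题/最小公倍数.py | minbeishu
-- ===== SOURCE A (Python) =====
-- def minbeishu(a,b,c):
--     s = [a*b,a*c,b*c,a*b*c]
--     for i in range(4):
--         d = min(s)
--         if d%a == 0 and d%b==0 and d%c ==0:
--             return d
--         else:
--             s.remove(d)
-- ===== SOURCE B (Python) =====
-- def minbeishu(a, b, c):
--     best = a * b * c
--     if a * b % c == 0:
--         best = min(best, a * b)
--     if a * c % b == 0:
--         best = min(best, a * c)
--     if b * c % a == 0:
--         best = min(best, b * c)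
--     return best
-- ===== Notes on version B (the rewrite author's own statement) =====
-- stated objective: simpler
-- what changed: Replaced A's min-extract-and-remove selection loop over the candidate list by three direct divisibility tests (c|ab, b|ac, a|bc) that fold min into a single running best starting from a*b*c, which always qualifies; no list, no removal loop.
import Mathlib
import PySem

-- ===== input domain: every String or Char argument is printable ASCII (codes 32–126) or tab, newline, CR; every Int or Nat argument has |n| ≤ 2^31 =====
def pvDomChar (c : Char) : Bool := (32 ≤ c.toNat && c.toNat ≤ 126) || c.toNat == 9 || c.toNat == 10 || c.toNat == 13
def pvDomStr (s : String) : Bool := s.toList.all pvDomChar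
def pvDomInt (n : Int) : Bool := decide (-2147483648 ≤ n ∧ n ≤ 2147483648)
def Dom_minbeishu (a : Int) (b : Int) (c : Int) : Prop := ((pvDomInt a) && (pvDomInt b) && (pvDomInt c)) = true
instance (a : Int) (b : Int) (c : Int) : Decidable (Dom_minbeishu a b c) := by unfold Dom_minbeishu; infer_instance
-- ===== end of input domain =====

-- B replaces A's repeated min-extract-and-remove loop by three direct divisibility
-- tests folded into one running minimum; objective: simpler.

-- ===== PORT A =====
-- the for-i-in-range(4) loop with early return: fuel-bounded recursion on the
-- shrinking list s; the `0` fall-offs are unreachable under Pre_ (Python: None / exception)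
def minbeishuGo (a : Int) (b : Int) (c : Int) : Nat → List Int → Int
  | 0, _ => 0
  | fuel + 1, s =>
    match PySem.List.min? s (fun x => x) with
    | none => 0
    | some d =>
      if PySem.Int.mod d a = 0 ∧ PySem.Int.mod d b = 0 ∧ PySem.Int.mod d c = 0 then d
      else
        match PySem.List.remove? s d with
        | none => 0
        | some s' => minbeishuGo a b c fuel s'

def minbeishu (a : Int) (b : Int) (c : Int) : Int :=
  minbeishuGo a b c 4 [a * b, a * c, b * c, a * b * c]

-- ===== PORT B =====
def minbeishu_alt (a : Int) (b : Int) (c : Int) : Int :=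
  let best := a * b * c
  let best := if PySem.Int.mod (a * b) c = 0 then min best (a * b) else best
  let best := if PySem.Int.mod (a * c) b = 0 then min best (a * c) else best
  let best := if PySem.Int.mod (b * c) a = 0 then min best (b * c) else best
  best

-- ===== PRECONDITION & SPEC =====
-- Pre_ excludes exactly the inputs with a zero argument, on which Python A raises ZeroDivisionError.
def Pre_minbeishu (a : Int) (b : Int) (c : Int) : Prop := a ≠ 0 ∧ b ≠ 0 ∧ c ≠ 0
instance (a : Int) (b : Int) (c : Int) : Decidable (Pre_minbeishu a b c) := by unfold Pre_minbeishu; infer_instance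
def pvWitness_minbeishu : Int × Int × Int := (3, 4, 6)

def Spec_minbeishu (a : Int) (b : Int) (c : Int) (out : Int) : Prop := out = minbeishu_alt a b c
instance (a : Int) (b : Int) (c : Int) (out : Int) : Decidable (Spec_minbeishu a b c out) := by unfold Spec_minbeishu; infer_instance

-- ===== CLAIM (what is proved, stated in full; the proofs are below) =====
def Claim_equal_minbeishu : Prop := ∀ (a : Int) (b : Int) (c : Int), Dom_minbeishu a b c → Pre_minbeishu a b c → Spec_minbeishu a b c (minbeishu a b c)

-- ===== LEMMAS AND PROOFS =====

-- the qualifying test of A's loop, as a Bool predicate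
def pvQual (a b c d : Int) : Bool :=
  decide (PySem.Int.mod d a = 0 ∧ PySem.Int.mod d b = 0 ∧ PySem.Int.mod d c = 0)

-- minimum of a nonempty list via foldl (0 on [], never used there)
def pvQmin : List Int → Int
  | [] => 0
  | h :: t => t.foldl min h

theorem pv_foldl_min_eq (t : List Int) (h m : Int)
    (hmem : m = h ∨ m ∈ t) (hh : m ≤ h) (ht : ∀ y ∈ t, m ≤ y) :
    t.foldl min h = m := by
  induction t generalizing h with
  | nil =>
    rcases hmem with rfl | hm
    · rfl
    · simp at hm
  | cons x t ih =>
    have hx : m ≤ x := ht x (by simp)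
    have ht' : ∀ y ∈ t, m ≤ y := fun y hy => ht y (by simp [hy])
    simp only [List.foldl_cons]
    rcases hmem with rfl | hm
    · exact ih (min m x) (Or.inl (by omega)) (by omega) ht'
    · rcases List.mem_cons.mp hm with rfl | hm'
      · exact ih (min h m) (Or.inl (by omega)) (by omega) ht'
      · exact ih (min h x) (Or.inr hm') (by omega) ht'

theorem pv_loop_eq (a b c : Int) (fuel : Nat) (s : List Int)
    (hlen : s.length ≤ fuel) (hne : s.filter (pvQual a b c) ≠ []) :
    minbeishuGo a b c fuel s = pvQmin (s.filter (pvQual a b c)) := by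
  induction fuel generalizing s with
  | zero =>
    have : s = [] := by
      cases s with
      | nil => rfl
      | cons x t => simp at hlen
    subst this; simp at hne
  | succ n ih =>
    obtain ⟨x0, t0, rfl⟩ : ∃ x0 t0, s = x0 :: t0 := by
      cases s with
      | nil => simp at hne
      | cons x t => exact ⟨x, t, rfl⟩
    have hd : PySem.List.min? (x0 :: t0) (fun x => x) = some (t0.foldl min x0) := by
      exact PySem.List.min?_id_cons x0 t0
    set s := x0 :: t0 with hs
    set d := t0.foldl min x0 with hdd
    have hdmem : d ∈ s := PySem.List.min?_mem hd
    have hdmin : ∀ y ∈ s, d ≤ y := fun y hy => PySem.List.min?_isMin hd y hy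
    simp only [minbeishuGo, hd]
    split
    · next hq =>
      -- the minimum qualifies: it is the least qualifying element
      have hdf : d ∈ s.filter (pvQual a b c) :=
        List.mem_filter.mpr ⟨hdmem, by simp [pvQual, hq]⟩
      cases hf : s.filter (pvQual a b c) with
      | nil => simp [hf] at hdf
      | cons h t =>
        rw [hf] at hdf
        have hsub : ∀ y ∈ h :: t, d ≤ y := by
          intro y hy
          exact hdmin y (List.mem_filter.mp (hf ▸ hy) |>.1)
        simp only [pvQmin]
        exact (pv_foldl_min_eq t h d
          (by rcases List.mem_cons.mp hdf with rfl | hm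
              · exact Or.inl rfl
              · exact Or.inr hm)
          (hsub h (by simp)) (fun y hy => hsub y (by simp [hy]))).symm
    · next hq =>
      rw [PySem.List.remove?_eq_some_erase s d hdmem]
      have hfq : pvQual a b c d = false := by
        simp only [pvQual, decide_eq_false_iff_not]; exact hq
      -- erasing a non-qualifying element leaves the filter unchanged
      obtain ⟨l1, l2, _, hseq, he⟩ := List.exists_erase_eq hdmem
      have hfe : (s.erase d).filter (pvQual a b c) = s.filter (pvQual a b c) := by
        rw [he, hseq]
        simp [List.filter_append, hfq]
      have hlen' : (s.erase d).length ≤ n := by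
        rw [List.length_erase_of_mem hdmem]
        simp only [hs] at hlen ⊢
        simp at hlen ⊢
        omega
      show minbeishuGo a b c n (s.erase d) = pvQmin (s.filter (pvQual a b c))
      rw [ih (s.erase d) hlen' (by rw [hfe]; exact hne), hfe]

theorem pv_mod_zero_of_dvd (d e : Int) (h : e ∣ d) : PySem.Int.mod d e = 0 :=
  (PySem.Int.mod_eq_zero_iff_dvd d e).mpr h

-- ===== VERDICT (by name: the statement is the Claim_ definition above) =====
theorem minbeishu_spec : Claim_equal_minbeishu := by
  intro a b c _ hpre
  obtain ⟨ha, hb, hc⟩ := hpre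
  unfold Spec_minbeishu minbeishu
  have hwa : PySem.Int.mod (a * b) a = 0 := pv_mod_zero_of_dvd _ _ ⟨b, by ring⟩
  have hwb : PySem.Int.mod (a * b) b = 0 := pv_mod_zero_of_dvd _ _ ⟨a, by ring⟩
  have hxa : PySem.Int.mod (a * c) a = 0 := pv_mod_zero_of_dvd _ _ ⟨c, by ring⟩
  have hxc : PySem.Int.mod (a * c) c = 0 := pv_mod_zero_of_dvd _ _ ⟨a, by ring⟩
  have hyb : PySem.Int.mod (b * c) b = 0 := pv_mod_zero_of_dvd _ _ ⟨c, by ring⟩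
  have hyc : PySem.Int.mod (b * c) c = 0 := pv_mod_zero_of_dvd _ _ ⟨b, by ring⟩
  have hza : PySem.Int.mod (a * b * c) a = 0 := pv_mod_zero_of_dvd _ _ ⟨b * c, by ring⟩
  have hzb : PySem.Int.mod (a * b * c) b = 0 := pv_mod_zero_of_dvd _ _ ⟨a * c, by ring⟩
  have hzc : PySem.Int.mod (a * b * c) c = 0 := pv_mod_zero_of_dvd _ _ ⟨a * b, by ring⟩
  have hzq : pvQual a b c (a * b * c) = true := by simp [pvQual, hza, hzb, hzc]
  have hne : List.filter (pvQual a b c) [a * b, a * c, b * c, a * b * c] ≠ [] :=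
    List.ne_nil_of_mem (List.mem_filter.mpr ⟨by simp, hzq⟩)
  rw [pv_loop_eq a b c 4 [a * b, a * c, b * c, a * b * c] (by simp) hne]
  by_cases h1 : PySem.Int.mod (a * b) c = 0 <;>
    by_cases h2 : PySem.Int.mod (a * c) b = 0 <;>
      by_cases h3 : PySem.Int.mod (b * c) a = 0 <;>
        simp [pvQual, hwa, hwb, hxa, hxc, hyb, hyc, hza, hzb, hzc,
          h1, h2, h3, pvQmin, minbeishu_alt, List.foldl] <;> omega
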